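-- pv_equiv track=rewrite | github.com/alexfarouz/Python-Projects | Project-4/afarouz_201_PA4.py | replace_elems
-- ===== SOURCE A (Python) =====
-- def replace_elems(lst1, lst2, n):
--     new_list = []
--     if len(lst1) > len(lst2):
--         for j in range(len(lst2)):
--             if ((j + 1) % n) == 0 and j != 0:
--                 new_list.append(lst1[j])
--             elif n == 1:
--                 new_list.append(lst1[j])
--             else:
--                 new_list.append(lst2[j])
--     else:
--         for j in range(len(lst1)):
--             if ((j + 1) % n) == 0:
--                 new_list.append(lst2[j])
--             elif n == 1:
--                 new_list.append(lst2[j])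
--             else:
--                 new_list.append(lst1[j])
--     return new_list
-- ===== SOURCE B (Python) =====
-- def replace_elems(lst1, lst2, n):
--     longer, shorter = (lst1, lst2) if len(lst1) > len(lst2) else (lst2, lst1)
--     L = len(shorter)
--     if L == 0:
--         return []
--     m = abs(n)
--     out = []
--     prev = 0
--     for k in range(m - 1, L, m):
--         out += shorter[prev:k]
--         out.append(longer[k])
--         prev = k + 1
--     out += shorter[prev:]
--     return out
-- ===== Notes on version B (the rewrite author's own statement) =====
-- stated objective: alternative
-- what changed: B replaces A's per-element three-way branch loop (testing (j+1)%n at every index) with a slice-and-stitch algorithm: it strides directly over the replacement positions range(|n|-1, len(shorter), |n|) and concatenates slices of the shorter list with one element of the longer list per stride, flushing the remaining tail at the end.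
-- intended difference: When len(lst1)>len(lst2), n==-1 and lst2 is nonempty with lst1[0]!=lst2[0], A's extra 'j != 0' guard (present only in that branch, not the symmetric one) keeps lst2[0] at index 0 while B uniformly replaces it with lst1[0], matching A's own behaviour in the other branch, which is the intended 'replace every position where (j+1)%n==0' rule. — e.g. on replace_elems([5, 6], [7], -1): A returns [7], B returns [5]
import Mathlib
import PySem

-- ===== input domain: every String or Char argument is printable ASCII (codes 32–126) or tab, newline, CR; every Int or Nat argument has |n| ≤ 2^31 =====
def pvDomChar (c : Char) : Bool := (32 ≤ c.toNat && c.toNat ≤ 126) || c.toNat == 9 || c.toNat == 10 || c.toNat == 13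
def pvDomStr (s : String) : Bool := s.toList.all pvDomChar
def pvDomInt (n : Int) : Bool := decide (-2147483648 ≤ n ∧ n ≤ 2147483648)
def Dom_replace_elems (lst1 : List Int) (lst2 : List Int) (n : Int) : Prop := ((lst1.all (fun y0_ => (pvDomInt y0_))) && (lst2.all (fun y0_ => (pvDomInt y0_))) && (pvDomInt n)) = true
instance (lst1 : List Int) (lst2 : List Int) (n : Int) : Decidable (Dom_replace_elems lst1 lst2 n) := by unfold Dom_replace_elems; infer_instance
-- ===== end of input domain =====

-- B: instead of testing (j+1)%n at every index, it strides directly over the replacement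
-- positions range(|n|-1, len(shorter), |n|) and stitches the result from slices of the shorter
-- list with one element of the longer list per stride — an alternative slice-and-stitch algorithm.

-- ===== PORT A =====
def replace_elems (lst1 : List Int) (lst2 : List Int) (n : Int) : List Int :=
  if lst1.length > lst2.length then
    (PySem.List.pyRange 0 lst2.length 1).foldl (fun new_list j =>
      if PySem.Int.mod (j + 1) n == 0 && j != 0 then
        new_list ++ [PySem.List.pyGetD lst1 j 0]
      else if n == 1 then
        new_list ++ [PySem.List.pyGetD lst1 j 0]
      else
        new_list ++ [PySem.List.pyGetD lst2 j 0]) []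
  else
    (PySem.List.pyRange 0 lst1.length 1).foldl (fun new_list j =>
      if PySem.Int.mod (j + 1) n == 0 then
        new_list ++ [PySem.List.pyGetD lst2 j 0]
      else if n == 1 then
        new_list ++ [PySem.List.pyGetD lst2 j 0]
      else
        new_list ++ [PySem.List.pyGetD lst1 j 0]) []

-- ===== PORT B =====
def replace_elems_alt (lst1 : List Int) (lst2 : List Int) (n : Int) : List Int :=
  let p := if lst1.length > lst2.length then (lst1, lst2) else (lst2, lst1)
  let longer := p.1
  let shorter := p.2
  let L : Int := shorter.length
  if L == 0 then []
  else
    let m : Int := |n|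
    let s := (PySem.List.pyRange (m - 1) L m).foldl
      (fun (st : List Int × Int) k =>
        (st.1 ++ PySem.List.slice shorter (some st.2) (some k)
              ++ [PySem.List.pyGetD longer k 0], k + 1))
      ([], 0)
    s.1 ++ PySem.List.slice shorter (some s.2) none

-- ===== PRECONDITION & SPEC =====
-- Pre_ excludes exactly the inputs where Python A raises ZeroDivisionError: n == 0 with a nonempty loop
-- (i.e. both lists nonempty).
def Pre_replace_elems (lst1 : List Int) (lst2 : List Int) (n : Int) : Prop :=
  n ≠ 0 ∨ lst1 = [] ∨ lst2 = []
instance (lst1 : List Int) (lst2 : List Int) (n : Int) : Decidable (Pre_replace_elems lst1 lst2 n) := by unfold Pre_replace_elems; infer_instance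
def pvWitness_replace_elems : List Int × List Int × Int := ([1, 2, 3], [4, 5], 2)

-- A's first branch (len lst1 > len lst2) carries an extra 'j != 0' guard absent from the symmetric branch:
-- when n = -1 (so (j+1)%n==0 at every j) and lst2 ≠ [] with lst1[0] ≠ lst2[0], A keeps lst2[0] at index 0
-- while B replaces it with lst1[0], as A itself does in the other branch — B's uniform rule is the intended one.
def D_replace_elems (lst1 : List Int) (lst2 : List Int) (n : Int) : Prop :=
  lst1.length > lst2.length ∧ n = -1 ∧ lst2 ≠ [] ∧ lst1.headI ≠ lst2.headI
instance (lst1 : List Int) (lst2 : List Int) (n : Int) : Decidable (D_replace_elems lst1 lst2 n) := by unfold D_replace_elems; infer_instance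
def Spec_replace_elems (lst1 : List Int) (lst2 : List Int) (n : Int) (out : List Int) : Prop := ¬ D_replace_elems lst1 lst2 n → out = replace_elems_alt lst1 lst2 n
instance (lst1 : List Int) (lst2 : List Int) (n : Int) (out : List Int) : Decidable (Spec_replace_elems lst1 lst2 n out) := by unfold Spec_replace_elems; infer_instance
def pvDiffWitness_replace_elems : List Int × List Int × Int := ([5, 6], [7], -1)
def pvDiffWitnessOut_replace_elems : (List Int) × (List Int) := ([7], [5])

-- ===== CLAIM (what is proved, stated in full; the proofs are below) =====
def Claim_unchanged_replace_elems : Prop := ∀ (lst1 : List Int) (lst2 : List Int) (n : Int), Dom_replace_elems lst1 lst2 n → Pre_replace_elems lst1 lst2 n → Spec_replace_elems lst1 lst2 n (replace_elems lst1 lst2 n)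
def Claim_changed_replace_elems : Prop := Dom_replace_elems (pvDiffWitness_replace_elems.1) (pvDiffWitness_replace_elems.2.1) (pvDiffWitness_replace_elems.2.2) ∧ Pre_replace_elems (pvDiffWitness_replace_elems.1) (pvDiffWitness_replace_elems.2.1) (pvDiffWitness_replace_elems.2.2) ∧ D_replace_elems (pvDiffWitness_replace_elems.1) (pvDiffWitness_replace_elems.2.1) (pvDiffWitness_replace_elems.2.2) ∧ replace_elems (pvDiffWitness_replace_elems.1) (pvDiffWitness_replace_elems.2.1) (pvDiffWitness_replace_elems.2.2) = pvDiffWitnessOut_replace_elems.1 ∧ replace_elems_alt (pvDiffWitness_replace_elems.1) (pvDiffWitness_replace_elems.2.1) (pvDiffWitness_replace_elems.2.2) = pvDiffWitnessOut_replace_elems.2 ∧ pvDiffWitnessOut_replace_elems.1 ≠ pvDiffWitnessOut_replace_elems.2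
def Claim_exact_replace_elems : Prop := ∀ (lst1 : List Int) (lst2 : List Int) (n : Int), Dom_replace_elems lst1 lst2 n → Pre_replace_elems lst1 lst2 n → D_replace_elems lst1 lst2 n → replace_elems lst1 lst2 n ≠ replace_elems_alt lst1 lst2 n

-- ===== LEMMAS AND PROOFS =====

-- A-side loop shape: append-one-of-three-values fold is a map
theorem pv_foldl_choice (c1 c2 : Int → Bool) (v1 v2 : Int → Int) (l : List Int) (acc : List Int) :
    l.foldl (fun a j => if c1 j then a ++ [v1 j] else if c2 j then a ++ [v1 j] else a ++ [v2 j]) acc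
      = acc ++ l.map (fun j => if c1 j then v1 j else if c2 j then v1 j else v2 j) := by
  induction l generalizing acc with
  | nil => simp
  | cons x xs ih =>
    simp only [List.foldl_cons, List.map_cons]
    rw [ih]
    split_ifs <;> simp

-- element-wise characterisation of port A, branch len lst1 > len lst2
theorem pv_A_elem1 (lst1 lst2 : List Int) (n : Int) (h : lst1.length > lst2.length) (i : Nat) :
    (replace_elems lst1 lst2 n)[i]? =
      if i < lst2.length then
        some (if PySem.Int.mod ((i : Int) + 1) n == 0 && (i : Int) != 0 then lst1.getD i 0
              else if n == 1 then lst1.getD i 0 else lst2.getD i 0)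
      else none := by
  unfold replace_elems
  rw [if_pos h, PySem.List.pyRange_zero_nat, pv_foldl_choice, List.map_map, List.nil_append]
  by_cases hi : i < lst2.length <;> simp [hi]

-- element-wise characterisation of port A, branch len lst1 ≤ len lst2
theorem pv_A_elem2 (lst1 lst2 : List Int) (n : Int) (h : ¬ lst1.length > lst2.length) (i : Nat) :
    (replace_elems lst1 lst2 n)[i]? =
      if i < lst1.length then
        some (if PySem.Int.mod ((i : Int) + 1) n == 0 then lst2.getD i 0
              else if n == 1 then lst2.getD i 0 else lst1.getD i 0)
      else none := by
  unfold replace_elems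
  rw [if_neg h, PySem.List.pyRange_zero_nat, pv_foldl_choice, List.map_map, List.nil_append]
  by_cases hi : i < lst1.length <;> simp [hi]

-- pyRange with a positive step, structural forms
theorem pv_pyRange_pos_nil (a b s : Int) (hs : 0 < s) (h : b ≤ a) :
    PySem.List.pyRange a b s = [] := by
  rw [PySem.List.pyRange_of_pos a b hs, if_neg (by omega)]
  simp

theorem pv_pyRange_pos_cons (a b s : Int) (hs : 0 < s) (h : a < b) :
    PySem.List.pyRange a b s = a :: PySem.List.pyRange (a + s) b s := by
  rw [PySem.List.pyRange_of_pos a b hs, PySem.List.pyRange_of_pos (a + s) b hs, if_pos h]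
  by_cases h2 : a + s < b
  · rw [if_pos h2]
    have h0 : 0 ≤ (b - (a + s) + s - 1) / s := Int.ediv_nonneg (by omega) (by omega)
    have hN : ((b - a + s - 1) / s).toNat = ((b - (a + s) + s - 1) / s).toNat + 1 := by
      have h1 : (b - a + s - 1) / s = (b - (a + s) + s - 1) / s + 1 := by
        have he : b - a + s - 1 = (b - (a + s) + s - 1) + 1 * s := by ring
        rw [he, Int.add_mul_ediv_right _ _ (by omega)]
      omega
    rw [hN, List.range_succ_eq_map]
    simp only [List.map_cons, List.map_map]
    refine congrArg₂ _ (by simp) ?_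
    apply List.map_congr_left
    intro k _
    simp only [Function.comp_apply]
    push_cast
    ring
  · rw [if_neg h2]
    have hN : ((b - a + s - 1) / s).toNat = 1 := by
      have h1 : (b - a + s - 1) / s = 1 := by
        have he : b - a + s - 1 = (b - a - 1) + 1 * s := by ring
        rw [he, Int.add_mul_ediv_right _ _ (by omega),
          Int.ediv_eq_zero_of_lt (by omega) (by omega)]
        norm_num
      omega
    rw [hN]
    simp

-- a contiguous piece of a list as a map over its index range
theorem pv_drop_take (xs : List Int) (p q : Nat) (h : p + q ≤ xs.length) :
    (xs.drop p).take q = (List.range' p q).map (fun t => xs.getD t 0) := by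
  apply List.ext_getElem
  · simp; omega
  · intro i h1 h2
    simp only [List.getElem_take, List.getElem_drop, List.getElem_map, List.getElem_range']
    rw [List.getD_eq_getElem xs 0 (by simp at h1 ⊢; omega)]
    congr 1
    omega

-- no multiple of m lies strictly between the multiple prev and prev + m
theorem pv_not_dvd_between (m prev t : Nat) (_hm : 0 < m) (hp : m ∣ prev)
    (h1 : prev < t + 1) (h2 : t + 1 < prev + m) : ¬ m ∣ (t + 1) := by
  intro hd
  have hsub : m ∣ (t + 1 - prev) := Nat.dvd_sub hd hp
  have := Nat.le_of_dvd (by omega) hsub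
  omega

-- invariant of B's stride loop: stitched output so far ++ the unprocessed tail
-- equals the element-wise merge over the remaining index range
theorem pv_B_loop (longer shorter : List Int) (_hlen : shorter.length ≤ longer.length)
    (m : Nat) (hm : 0 < m) :
    ∀ (fuel : Nat) (prev : Nat) (acc : List Int),
      shorter.length - prev ≤ fuel → m ∣ prev → prev ≤ shorter.length →
      (let s := (PySem.List.pyRange ((prev : Int) + (m : Int) - 1) (shorter.length : Int) m).foldl
          (fun (st : List Int × Int) k =>
            (st.1 ++ PySem.List.slice shorter (some st.2) (some k)
                  ++ [PySem.List.pyGetD longer k 0], k + 1)) (acc, (prev : Int));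
        s.1 ++ PySem.List.slice shorter (some s.2) none)
        = acc ++ (List.range' prev (shorter.length - prev)).map
            (fun t => if m ∣ (t + 1) then longer.getD t 0 else shorter.getD t 0) := by
  intro fuel
  induction fuel with
  | zero =>
    intro prev acc hfuel hdvd hle
    have hprev : prev = shorter.length := by omega
    rw [pv_pyRange_pos_nil _ _ _ (by exact_mod_cast hm) (by omega)]
    simp only [List.foldl_nil]
    rw [PySem.List.slice_from_natCast]
    subst hprev
    simp
  | succ f ih =>
    intro prev acc hfuel hdvd hle
    by_cases hlt : ((prev : Int) + (m : Int) - 1) < (shorter.length : Int)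
    · -- one more replacement position prev + m - 1
      have hplt : prev + m - 1 < shorter.length := by omega
      rw [pv_pyRange_pos_cons _ _ _ (by exact_mod_cast hm) hlt]
      simp only [List.foldl_cons]
      have hc1 : (prev : Int) + (m : Int) - 1 = ((prev + m - 1 : Nat) : Int) := by omega
      have hc2 : ((prev + m - 1 : Nat) : Int) + 1 = ((prev + m : Nat) : Int) := by omega
      have hc3 : (prev : Int) + (m : Int) - 1 + (m : Int) = ((prev + m : Nat) : Int) + (m : Int) - 1 := by
        push_cast; omega
      rw [hc3, hc1, PySem.List.slice_natCast, PySem.List.pyGetD_natCast, hc2]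
      rw [ih (prev + m) _ (by omega) (Nat.dvd_add hdvd (dvd_refl m)) (by omega)]
      have htake : prev + m - 1 - prev = m - 1 := by omega
      rw [htake, pv_drop_take shorter prev (m - 1) (by omega)]
      have h2 : List.range' prev m = List.range' prev (m - 1) ++ [prev + (m - 1)] := by
        conv_lhs => rw [show m = (m - 1) + 1 from by omega]
        rw [List.range'_1_concat]
      have hsplit : List.range' prev (shorter.length - prev)
          = (List.range' prev (m - 1) ++ [prev + (m - 1)]) ++ List.range' (prev + m) (shorter.length - (prev + m)) := by
        rw [show shorter.length - prev = m + (shorter.length - (prev + m)) from by omega,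
          ← List.range'_append, one_mul, h2]
      rw [hsplit]
      simp only [List.map_append, List.map_cons, List.map_nil, List.append_assoc]
      have hmap1 : (List.range' prev (m - 1)).map
            (fun t => if m ∣ t + 1 then longer.getD t 0 else shorter.getD t 0)
          = (List.range' prev (m - 1)).map (fun t => shorter.getD t 0) := by
        apply List.map_congr_left
        intro t ht
        have hmem := List.mem_range'_1.mp ht
        rw [if_neg (pv_not_dvd_between m prev t hm hdvd (by omega) (by omega))]
      have hdvd2 : m ∣ (prev + (m - 1) + 1) := by
        rw [show prev + (m - 1) + 1 = prev + m from by omega]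
        exact Nat.dvd_add hdvd (dvd_refl m)
      have hidx : prev + (m - 1) = prev + m - 1 := by omega
      rw [hmap1, if_pos hdvd2, hidx]
    · -- no replacement position left: flush the tail of shorter
      rw [pv_pyRange_pos_nil _ _ _ (by exact_mod_cast hm) (by omega)]
      simp only [List.foldl_nil]
      rw [PySem.List.slice_from_natCast]
      have hdrop : shorter.drop prev = (shorter.drop prev).take (shorter.length - prev) := by
        rw [List.take_of_length_le (by simp)]
      rw [hdrop, pv_drop_take shorter prev (shorter.length - prev) (by omega)]
      congr 1
      apply List.map_congr_left
      intro t ht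
      have hmem := List.mem_range'_1.mp ht
      rw [if_neg (pv_not_dvd_between m prev t hm hdvd (by omega) (by omega))]

-- port B computed element-wise, for n ≠ 0
theorem pv_alt_eq (lst1 lst2 : List Int) (n : Int) (hn : n ≠ 0) :
    replace_elems_alt lst1 lst2 n =
      (List.range (min lst1.length lst2.length)).map (fun t =>
        if n.natAbs ∣ (t + 1)
        then (if lst1.length > lst2.length then lst1 else lst2).getD t 0
        else (if lst1.length > lst2.length then lst2 else lst1).getD t 0) := by
  have hm : 0 < n.natAbs := Int.natAbs_pos.mpr hn
  have habs : |n| = (n.natAbs : Int) := Int.abs_eq_natAbs n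
  unfold replace_elems_alt
  by_cases h : lst1.length > lst2.length <;>
    simp only [h, if_pos, if_neg, not_false_iff]
  · have hmin : min lst1.length lst2.length = lst2.length := by omega
    by_cases h0 : lst2.length = 0
    · simp [h0]
    · rw [if_neg (by simpa using h0), habs, hmin]
      have h00 : ((n.natAbs : Int) - 1) = (((0 : Nat) : Int) + (n.natAbs : Int) - 1) := by push_cast; ring
      rw [h00, List.range_eq_range']
      have hB := pv_B_loop lst1 lst2 (by omega) n.natAbs hm lst2.length 0 [] (by omega) (dvd_zero _) (by omega)
      simp only [Nat.cast_zero, Nat.sub_zero, List.nil_append] at hB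
      exact hB
  · have hmin : min lst1.length lst2.length = lst1.length := by omega
    by_cases h0 : lst1.length = 0
    · simp [h0]
    · rw [if_neg (by simpa using h0), habs, hmin]
      have h00 : ((n.natAbs : Int) - 1) = (((0 : Nat) : Int) + (n.natAbs : Int) - 1) := by push_cast; ring
      rw [h00, List.range_eq_range']
      have hB := pv_B_loop lst2 lst1 (by omega) n.natAbs hm lst1.length 0 [] (by omega) (dvd_zero _) (by omega)
      simp only [Nat.cast_zero, Nat.sub_zero, List.nil_append] at hB
      exact hB

-- 'mod (i+1) n == 0' is divisibility by |n|
theorem pv_mod_iff (n : Int) (i : Nat) :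
    (PySem.Int.mod ((i : Int) + 1) n = 0) ↔ n.natAbs ∣ (i + 1) := by
  rw [PySem.Int.mod_eq_zero_iff_dvd]
  constructor
  · intro h
    exact Int.ofNat_dvd.mp (by rw [Int.natAbs_dvd]; exact_mod_cast h)
  · intro h
    have h2 : ((n.natAbs : Int)) ∣ ((i : Int) + 1) := by exact_mod_cast Int.ofNat_dvd.mpr h
    exact Int.natAbs_dvd.mp h2

-- ===== VERDICT (by name: the statement is the Claim_ definition above) =====
theorem replace_elems_spec : Claim_unchanged_replace_elems := by
  intro lst1 lst2 n _ hpre hnd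
  by_cases hlen0 : min lst1.length lst2.length = 0
  · -- one list is empty: both programs return []
    have hA : replace_elems lst1 lst2 n = [] := by
      unfold replace_elems
      by_cases hb : lst1.length > lst2.length
      · rw [if_pos hb]
        have h2 : lst2.length = 0 := by omega
        simp [h2]
      · rw [if_neg hb]
        have h1 : lst1.length = 0 := by omega
        simp [h1]
    have hB : replace_elems_alt lst1 lst2 n = [] := by
      unfold replace_elems_alt
      by_cases hb : lst1.length > lst2.length
      · rw [if_pos hb]
        have h2 : lst2.length = 0 := by omega
        simp [h2]
      · rw [if_neg hb]
        have h1 : lst1.length = 0 := by omega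
        simp [h1]
    rw [hA, hB]
  · have hn : n ≠ 0 := by
      rcases hpre with h | h | h
      · exact h
      · simp [h] at hlen0
      · simp [h] at hlen0
    rw [pv_alt_eq lst1 lst2 n hn]
    apply List.ext_getElem?
    intro i
    by_cases hb : lst1.length > lst2.length
    · rw [pv_A_elem1 lst1 lst2 n hb i]
      have hmin : min lst1.length lst2.length = lst2.length := by omega
      by_cases hi : i < lst2.length
      · rw [if_pos hi, List.getElem?_map, List.getElem?_range (by omega)]
        simp only [hb, if_true, Option.map_some, Option.some.injEq]
        by_cases hdv : n.natAbs ∣ (i + 1)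
        · have hm0 : PySem.Int.mod ((i : Int) + 1) n = 0 := (pv_mod_iff n i).mpr hdv
          rw [if_pos hdv]
          by_cases hi0 : i = 0
          · subst hi0
            have hu : n = 1 ∨ n = -1 := by
              have h1 : n.natAbs = 1 := Nat.dvd_one.mp (by simpa using hdv)
              simpa using Int.natAbs_eq_iff.mp h1
            rcases hu with hn1 | hn1 <;> subst hn1
            · simp
            · simp only [Nat.cast_zero]
              rw [if_neg (by decide), if_neg (by decide)]
              -- ¬D gives equal heads
              have hne2 : lst2 ≠ [] := by intro he; simp [he] at hi
              have hne1 : lst1 ≠ [] := by intro he; rw [he] at hb; simp at hb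
              have hhead : lst1.headI = lst2.headI := by
                by_contra hc
                exact hnd ⟨hb, rfl, hne2, hc⟩
              rcases lst1 with _ | ⟨a1, t1⟩
              · exact absurd rfl hne1
              rcases lst2 with _ | ⟨a2, t2⟩
              · exact absurd rfl hne2
              simp_all
          · rw [if_pos (by simp [hm0]; omega)]
        · have hm0 : PySem.Int.mod ((i : Int) + 1) n ≠ 0 := fun hc => hdv ((pv_mod_iff n i).mp hc)
          have hn1 : n ≠ 1 := by
            intro hc; subst hc; exact hdv (by simp)
          rw [if_neg hdv, if_neg (by simp [hm0]), if_neg (by simpa using hn1)]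
      · rw [if_neg hi, List.getElem?_map, List.getElem?_eq_none (by simp; omega)]
        simp
    · rw [pv_A_elem2 lst1 lst2 n hb i]
      have hmin : min lst1.length lst2.length = lst1.length := by omega
      by_cases hi : i < lst1.length
      · rw [if_pos hi, List.getElem?_map, List.getElem?_range (by omega)]
        simp only [hb, if_false, Option.map_some, Option.some.injEq]
        by_cases hdv : n.natAbs ∣ (i + 1)
        · have hm0 : PySem.Int.mod ((i : Int) + 1) n = 0 := (pv_mod_iff n i).mpr hdv
          rw [if_pos hdv, if_pos (by simp [hm0])]
        · have hm0 : PySem.Int.mod ((i : Int) + 1) n ≠ 0 := fun hc => hdv ((pv_mod_iff n i).mp hc)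
          have hn1 : n ≠ 1 := by
            intro hc; subst hc; exact hdv (by simp)
          rw [if_neg hdv, if_neg (by simp [hm0]), if_neg (by simpa using hn1)]
      · rw [if_neg hi, List.getElem?_map, List.getElem?_eq_none (by simp; omega)]
        simp

theorem replace_elems_changed : Claim_changed_replace_elems := by
  unfold Claim_changed_replace_elems; decide

theorem replace_elems_tight : Claim_exact_replace_elems := by
  intro lst1 lst2 n _ hpre hd heq
  obtain ⟨h, hn, hne, hhead⟩ := hd
  have h0 : 0 < lst2.length := List.length_pos_iff.mpr hne
  have hA : (replace_elems lst1 lst2 n)[0]? = some (lst2.getD 0 0) := by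
    rw [pv_A_elem1 lst1 lst2 n h 0, if_pos h0]
    subst hn
    rw [if_neg (by simp), if_neg (by norm_num)]
  have hB : (replace_elems_alt lst1 lst2 n)[0]? = some (lst1.getD 0 0) := by
    rw [pv_alt_eq lst1 lst2 n (by omega)]
    subst hn
    rw [List.getElem?_map, List.getElem?_range (by omega : 0 < min lst1.length lst2.length)]
    simp [h]
  rw [heq, hB] at hA
  have hne1 : lst1 ≠ [] := by intro he; rw [he] at h; simp at h
  rcases lst1 with _ | ⟨a1, t1⟩
  · exact absurd rfl hne1
  rcases lst2 with _ | ⟨a2, t2⟩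
  · exact absurd rfl hne
  simp at hA hhead
  exact hhead hA
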